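-- pv_equiv track=rewrite | github.com/cookieyu2000/Gene | spyder/data_filtered.py | is_valid_group
-- ===== SOURCE A (Python) =====
-- def is_valid_group(group):
--     """
--     检查每组数据是否包含所需的三种格式。
--     """
--     has_t = False
--     has_a = False
--     has_entities = False
--
--     for line in group:
--         parts = line.strip().split('|')
--         if len(parts) == 3:
--             if parts[1].strip() == 't':
--                 has_t = True
--             elif parts[1].strip() == 'a':
--                 has_a = True
--         elif len(parts) == 5:
--             has_entities = True
--
--     return has_t and has_a and has_entities
-- ===== SOURCE B (Python) =====
-- def is_valid_group(group):
--     has_t = any(len(p) == 3 and p[1].strip() == 't'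
--                 for line in group for p in [line.strip().split('|')])
--     has_a = any(len(p) == 3 and p[1].strip() == 'a'
--                 for line in group for p in [line.strip().split('|')])
--     has_entities = any(len(line.strip().split('|')) == 5 for line in group)
--     return has_t and has_a and has_entities
-- ===== Notes on version B (the rewrite author's own statement) =====
-- stated objective: simpler
-- what changed: Replaced the single loop maintaining three boolean flags with three independent any() membership scans, one per required line format.
import Mathlib
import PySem

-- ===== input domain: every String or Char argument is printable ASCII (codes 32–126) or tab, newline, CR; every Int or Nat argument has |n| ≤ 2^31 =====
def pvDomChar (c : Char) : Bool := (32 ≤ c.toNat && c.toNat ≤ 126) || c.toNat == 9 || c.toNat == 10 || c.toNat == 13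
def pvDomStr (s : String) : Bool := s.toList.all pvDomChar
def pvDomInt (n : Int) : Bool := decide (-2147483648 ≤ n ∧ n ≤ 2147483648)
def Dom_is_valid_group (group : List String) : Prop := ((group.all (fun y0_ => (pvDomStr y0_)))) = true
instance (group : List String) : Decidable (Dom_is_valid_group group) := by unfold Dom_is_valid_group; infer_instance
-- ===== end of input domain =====

-- B replaces A's single three-flag loop with three independent any-scans, one per required format (simpler decomposition, same O(n) cost).

-- ===== PORT A =====
-- the loop body of A (one line's update of the three flags)
def pvStep (s : Bool × Bool × Bool) (line : String) : Bool × Bool × Bool :=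
  let parts := ((PySem.Str.split? (PySem.Str.strip line) "|").getD [])
  if parts.length == 3 then
    -- split? with nonempty sep is always some (getD [] never fires); parts[1] in range since len = 3
    if PySem.Str.strip (PySem.List.pyGetD parts 1 "") == "t" then (true, s.2.1, s.2.2)
    else if PySem.Str.strip (PySem.List.pyGetD parts 1 "") == "a" then (s.1, true, s.2.2)
    else s
  else if parts.length == 5 then (s.1, s.2.1, true)
  else s

-- single fold over the group maintaining the three flags, as in A's loop
def is_valid_group (group : List String) : Bool :=
  let st := group.foldl pvStep (false, false, false)
  st.1 && st.2.1 && st.2.2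

-- ===== PORT B =====
def is_valid_group_alt (group : List String) : Bool :=
  let has_t := group.any (fun line =>
    let p := ((PySem.Str.split? (PySem.Str.strip line) "|").getD [])
    p.length == 3 && PySem.Str.strip (PySem.List.pyGetD p 1 "") == "t")
  let has_a := group.any (fun line =>
    let p := ((PySem.Str.split? (PySem.Str.strip line) "|").getD [])
    p.length == 3 && PySem.Str.strip (PySem.List.pyGetD p 1 "") == "a")
  let has_entities := group.any (fun line =>
    (((PySem.Str.split? (PySem.Str.strip line) "|").getD [])).length == 5)
  has_t && has_a && has_entities

-- ===== PRECONDITION & SPEC =====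
def Spec_is_valid_group (group : List String) (out : Bool) : Prop := out = is_valid_group_alt group
instance (group : List String) (out : Bool) : Decidable (Spec_is_valid_group group out) := by unfold Spec_is_valid_group; infer_instance

-- ===== CLAIM (what is proved, stated in full; the proofs are below) =====
def Claim_equal_is_valid_group : Prop := ∀ (group : List String), Dom_is_valid_group group → Spec_is_valid_group group (is_valid_group group)

-- ===== LEMMAS AND PROOFS =====

def pvT (line : String) : Bool :=
  let p := ((PySem.Str.split? (PySem.Str.strip line) "|").getD [])
  p.length == 3 && PySem.Str.strip (PySem.List.pyGetD p 1 "") == "t"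

def pvA (line : String) : Bool :=
  let p := ((PySem.Str.split? (PySem.Str.strip line) "|").getD [])
  p.length == 3 && PySem.Str.strip (PySem.List.pyGetD p 1 "") == "a"

def pvE (line : String) : Bool :=
  (((PySem.Str.split? (PySem.Str.strip line) "|").getD [])).length == 5

lemma pvStep_eq (s : Bool × Bool × Bool) (x : String) :
    pvStep s x = (s.1 || pvT x, s.2.1 || pvA x, s.2.2 || pvE x) := by
  obtain ⟨t0, a0, e0⟩ := s
  simp only [pvStep, pvT, pvA, pvE]
  split_ifs with h3 ht ha h5 <;> simp_all [beq_iff_eq]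

lemma foldl_inv (l : List String) (t a e : Bool) :
    l.foldl pvStep (t, a, e) = (t || l.any pvT, a || l.any pvA, e || l.any pvE) := by
  induction l generalizing t a e with
  | nil => simp
  | cons x xs ih =>
    rw [List.foldl_cons, pvStep_eq, ih]
    simp [Bool.or_assoc]

-- ===== VERDICT (by name: the statement is the Claim_ definition above) =====
theorem is_valid_group_spec : Claim_equal_is_valid_group := by
  intro group _
  unfold Spec_is_valid_group is_valid_group is_valid_group_alt
  rw [foldl_inv]
  rfl
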